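-- pv_equiv track=rewrite | github.com/Bradley-Allen/USCUpstate | 236/ALLENGasPrices.py | highestpriceyearly
-- ===== SOURCE A (Python) =====
-- def highestpriceyearly(data):
--     highestprices = {}
--     for entry in data:
--         year = entry[0]
--         price = entry[1]
--         if year in highestprices:
--             if highestprices[year] < price:
--                 highestprices[year] = price
--         else:
--             highestprices[year] = price
--     return highestprices
-- ===== SOURCE B (Python) =====
-- def highestpriceyearly(data):
--     groups = {}
--     for year, price in data:
--         groups.setdefault(year, []).append(price)
--     return {year: max(prices) for year, prices in groups.items()}
-- ===== Notes on version B (the rewrite author's own statement) =====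
-- stated objective: alternative
-- what changed: Replaces the streaming running-max update of a single dict with a two-pass group-then-reduce: first group all prices into lists per year, then take max of each group in a dict comprehension.
import Mathlib
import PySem

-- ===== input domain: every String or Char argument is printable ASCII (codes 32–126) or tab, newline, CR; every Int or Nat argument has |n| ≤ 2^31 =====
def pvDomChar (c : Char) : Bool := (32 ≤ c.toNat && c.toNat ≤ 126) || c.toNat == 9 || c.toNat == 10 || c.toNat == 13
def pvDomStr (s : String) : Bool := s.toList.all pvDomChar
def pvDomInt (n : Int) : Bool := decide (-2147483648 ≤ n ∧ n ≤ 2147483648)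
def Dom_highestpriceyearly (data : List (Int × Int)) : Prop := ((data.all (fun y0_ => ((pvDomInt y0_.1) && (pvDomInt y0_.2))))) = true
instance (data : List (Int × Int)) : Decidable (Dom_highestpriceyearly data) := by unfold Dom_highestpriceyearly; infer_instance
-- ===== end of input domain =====

-- B replaces A's streaming running-max update with a two-pass group-then-reduce (alternative decomposition, same cost).

-- ===== PORT A =====
-- the loop body: check membership, compare against the stored price, overwrite or insert
def highestpriceyearly (data : List (Int × Int)) : List (Int × Int) :=
  (data.foldl (fun d p =>
      if d.contains p.1 then
        if d.getD p.1 0 < p.2 then d.insert p.1 p.2 else d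
      else d.insert p.1 p.2)
    (PySem.Dict.empty : PySem.Dict Int Int)).items

-- ===== PORT B =====
-- phase 1: group prices per year (setdefault(year, []).append(price) = modify);
-- phase 2: dict comprehension {year: max(prices)} over the groups' items
-- (max on a nonempty list ported as max?.getD 0; every group is nonempty so the default never fires)
def highestpriceyearly_alt (data : List (Int × Int)) : List (Int × Int) :=
  ((data.foldl (fun d p => d.modify p.1 [] (fun l => l ++ [p.2]))
    (PySem.Dict.empty : PySem.Dict Int (List Int))).items).map
      (fun p => (p.1, (PySem.List.max? p.2 (fun x => x)).getD 0))

-- ===== PRECONDITION & SPEC =====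
def Spec_highestpriceyearly (data : List (Int × Int)) (out : List (Int × Int)) : Prop := out = highestpriceyearly_alt data
instance (data : List (Int × Int)) (out : List (Int × Int)) : Decidable (Spec_highestpriceyearly data out) := by unfold Spec_highestpriceyearly; infer_instance

-- ===== CLAIM (what is proved, stated in full; the proofs are below) =====
def Claim_equal_highestpriceyearly : Prop := ∀ (data : List (Int × Int)), Dom_highestpriceyearly data → Spec_highestpriceyearly data (highestpriceyearly data)

-- ===== LEMMAS AND PROOFS =====

-- A's loop step, as one insert of the combined value
def pvStepA (d : PySem.Dict Int Int) (p : Int × Int) : PySem.Dict Int Int :=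
  if d.contains p.1 then
    if d.getD p.1 0 < p.2 then d.insert p.1 p.2 else d
  else d.insert p.1 p.2

-- running max over an optional accumulator
def pvRunMax (o : Option Int) (ps : List Int) : Option Int :=
  ps.foldl (fun o x => some (match o with | none => x | some v => max v x)) o

lemma pvRunMax_some (t : List Int) : ∀ (v : Int), pvRunMax (some v) t = some (t.foldl max v) := by
  induction t with
  | nil => intro v; rfl
  | cons x t ih => intro v; simpa [pvRunMax, List.foldl] using ih (max v x)

lemma insert_self_of_get? (d : PySem.Dict Int Int) (k : Int) (v : Int)
    (hnd : d.keys.Nodup) (h : d.get? k = some v) : d.insert k v = d := by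
  apply PySem.Dict.ext
  have hc : d.contains k = true := by
    rw [PySem.Dict.contains_eq_isSome_get?, h]; rfl
  rw [PySem.Dict.items_insert_of_contains _ _ hc]
  conv_rhs => rw [← List.map_id d.items]
  apply List.map_congr_left
  intro p hp
  by_cases hk : p.1 == k
  · have hk' : p.1 = k := by simpa using hk
    have := PySem.Dict.get?_of_mem_items (d := d) (k := p.1) (v := p.2) (by simpa using hp) hnd
    rw [hk'] at this
    have h3 : p.2 = v := by rw [this] at h; exact Option.some.inj h
    subst hk'
    simp [← h3]
  · simp [hk]

lemma stepA_eq_insert (d : PySem.Dict Int Int) (p : Int × Int) (hnd : d.keys.Nodup) :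
    pvStepA d p = d.insert p.1 (match d.get? p.1 with | none => p.2 | some v => max v p.2) := by
  unfold pvStepA
  rcases h : d.get? p.1 with _ | v
  · have hc : d.contains p.1 = false := by
      rw [PySem.Dict.contains_eq_isSome_get?, h]; rfl
    simp [hc]
  · have hc : d.contains p.1 = true := by
      rw [PySem.Dict.contains_eq_isSome_get?, h]; rfl
    have hg : d.getD p.1 0 = v := PySem.Dict.getD_of_get?_eq_some d 0 h
    by_cases hlt : v < p.2
    · have : max v p.2 = p.2 := max_eq_right hlt.le
      simp [hc, hg, hlt, this]
    · have : max v p.2 = v := max_eq_left (not_lt.mp hlt)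
      simp [hc, hg, hlt, this, insert_self_of_get? d p.1 v hnd h]

-- the whole A loop, key by key: its lookup is the running max of the filtered prices
lemma foldA_get? (l : List (Int × Int)) : ∀ (d : PySem.Dict Int Int), d.keys.Nodup → ∀ (k : Int),
    (l.foldl pvStepA d).get? k = pvRunMax (d.get? k) ((l.filter (fun p => p.1 == k)).map (·.2)) := by
  induction l with
  | nil => intro d _ k; rfl
  | cons p l ih =>
    intro d hnd k
    have hnd' : (pvStepA d p).keys.Nodup := by
      rw [stepA_eq_insert d p hnd]
      exact PySem.Dict.nodup_keys_insert _ _ _ hnd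
    rw [List.foldl_cons, ih _ hnd' k, stepA_eq_insert d p hnd]
    by_cases hk : p.1 = k
    · subst hk
      rw [PySem.Dict.get?_insert_self]
      rcases h : d.get? p.1 with _ | v <;> simp [pvRunMax, List.filter]
    · rw [PySem.Dict.get?_insert_of_ne _ _ (Ne.symm hk)]
      have : (p.1 == k) = false := by simpa using hk
      simp [this, List.filter]

-- both folds produce the same key list, in the same order
lemma keys_eq (data : List (Int × Int)) :
    (data.foldl pvStepA (PySem.Dict.empty : PySem.Dict Int Int)).keys
      = (data.foldl (fun d p => d.modify p.1 [] (fun l => l ++ [p.2]))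
          (PySem.Dict.empty : PySem.Dict Int (List Int))).keys := by
  have hA : ∀ (l : List (Int × Int)) (d : PySem.Dict Int Int), d.keys.Nodup →
      (l.foldl pvStepA d).keys
        = (l.foldl (fun d p => d.insert p.1 (match d.get? p.1 with | none => p.2 | some v => max v p.2)) d).keys := by
    intro l
    induction l with
    | nil => intro d _; rfl
    | cons p l ih =>
      intro d hnd
      rw [List.foldl_cons, List.foldl_cons, stepA_eq_insert d p hnd]
      exact ih _ (PySem.Dict.nodup_keys_insert _ _ _ hnd)
  rw [hA data _ (by simp [PySem.Dict.keys_empty])]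
  rw [PySem.Dict.keys_foldl_insert_key, PySem.Dict.keys_foldl_modify_key]
  rfl

lemma nodup_keysA (data : List (Int × Int)) :
    (data.foldl pvStepA (PySem.Dict.empty : PySem.Dict Int Int)).keys.Nodup := by
  induction data using List.reverseRecOn with
  | nil => simp [PySem.Dict.keys_empty]
  | append_singleton l p ih =>
    rw [List.foldl_append, List.foldl_cons, List.foldl_nil,
        stepA_eq_insert _ p ih]
    exact PySem.Dict.nodup_keys_insert _ _ _ ih

theorem main (data : List (Int × Int)) : highestpriceyearly data = highestpriceyearly_alt data := by
  unfold highestpriceyearly highestpriceyearly_alt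
  set A := data.foldl pvStepA (PySem.Dict.empty : PySem.Dict Int Int) with hAdef
  set G := data.foldl (fun d p => d.modify p.1 [] (fun l => l ++ [p.2]))
      (PySem.Dict.empty : PySem.Dict Int (List Int)) with hGdef
  have hndA : A.keys.Nodup := nodup_keysA data
  have hndG : G.keys.Nodup := PySem.Dict.nodup_keys_foldl_modify_key data (·.1) [] (fun d p l => l ++ [p.2]) _ (by simp [PySem.Dict.keys_empty])
  have hA : A.items = A.keys.map (fun k => (k, A.getD k 0)) := PySem.Dict.items_eq_map_keys A hndA 0
  have hG : G.items = G.keys.map (fun k => (k, G.getD k [])) := PySem.Dict.items_eq_map_keys G hndG []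
  have hfold : (fun d (p : Int × Int) =>
      if d.contains p.1 then if d.getD p.1 0 < p.2 then d.insert p.1 p.2 else d else d.insert p.1 p.2) = pvStepA := rfl
  rw [hfold, ← hAdef, hA, hG, List.map_map, ← keys_eq data, hGdef]
  apply List.map_congr_left
  intro k hk
  simp only [Function.comp]
  congr 1
  -- the group for k is exactly the filtered price list, and it is nonempty since k is a key
  have hGk : G.getD k [] = (data.filter (fun p => p.1 == k)).map (·.2) := by
    rw [hGdef, PySem.Dict.getD_foldl_modify_append, PySem.Dict.getD_empty]; rfl
  have hAk : A.get? k = pvRunMax none ((data.filter (fun p => p.1 == k)).map (·.2)) := by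
    rw [hAdef, foldA_get? data _ (by simp [PySem.Dict.keys_empty]) k, PySem.Dict.get?_empty]
  -- k ∈ A.keys, so A.get? k is some value, hence the filtered list is nonempty
  have hsome : (A.get? k).isSome := by
    rw [← PySem.Dict.contains_eq_isSome_get?]
    exact (PySem.Dict.contains_iff_mem_keys _ _).mpr hk
  rcases hne : (data.filter (fun p => p.1 == k)).map (·.2) with _ | ⟨x, t⟩
  · rw [hAk, hne] at hsome; simp [pvRunMax] at hsome
  · have h1 : A.get? k = some (t.foldl max x) := by
      rw [hAk, hne]
      show pvRunMax (some x) t = _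
      exact pvRunMax_some t x
    rw [PySem.Dict.getD_eq_get?_getD, h1, ← hGdef, hGk, hne,
        PySem.List.max?_id_cons]

-- ===== VERDICT (by name: the statement is the Claim_ definition above) =====
theorem highestpriceyearly_spec : Claim_equal_highestpriceyearly := by
  intro data _
  unfold Spec_highestpriceyearly
  exact main data
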